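-- pv_equiv track=rewrite | github.com/pypi-data/pypi-mirror-373 | packages/neosqlite/neosqlite-0.7.0-py3-none-any.whl/neosqlite/temporary_table_aggregation.py | can_process_with_temporary_tables
-- ===== SOURCE A (Python) =====
-- from typing import Any, Dict, List, Callable, Optional
--
-- def can_process_with_temporary_tables(pipeline: List[Dict[str, Any]]) -> bool:
--     """
--     Determine if a pipeline can be processed with temporary tables.
--
--     Args:
--         pipeline: List of aggregation pipeline stages
--
--     Returns:
--         True if the pipeline can be processed with temporary tables, False otherwise
--     """
--     # Check if all stages are supported
--     supported_stages = {
--         "$match",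
--         "$unwind",
--         "$sort",
--         "$skip",
--         "$limit",
--         "$lookup",
--     }
--
--     for stage in pipeline:
--         stage_name = next(iter(stage.keys()))
--         if stage_name not in supported_stages:
--             return False
--
--     return True
-- ===== SOURCE B (Python) =====
-- def can_process_with_temporary_tables(pipeline):
--     # Histogram approach: count how often each stage name occurs, then the
--     # pipeline is processable iff the occurrences of the six supported names
--     # account for every stage.
--     counts = {}
--     for stage in pipeline:
--         name = next(iter(stage.keys()))
--         counts[name] = counts.get(name, 0) + 1
--     supported = ("$match", "$unwind", "$sort", "$skip", "$limit", "$lookup")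
--     total = 0
--     for s in supported:
--         total += counts.get(s, 0)
--     return total == len(pipeline)
-- ===== Notes on version B (the rewrite author's own statement) =====
-- stated objective: alternative
-- what changed: Replaces the per-stage membership test with early return by a two-phase counting algorithm: build a histogram of stage names, then compare the sum of the counts of the six supported names with the pipeline length.
-- outside the precondition, e.g. on can_process_with_temporary_tables([{'$foo': 'x'}, {}]): A returns False, B raises StopIteration
import Mathlib
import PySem

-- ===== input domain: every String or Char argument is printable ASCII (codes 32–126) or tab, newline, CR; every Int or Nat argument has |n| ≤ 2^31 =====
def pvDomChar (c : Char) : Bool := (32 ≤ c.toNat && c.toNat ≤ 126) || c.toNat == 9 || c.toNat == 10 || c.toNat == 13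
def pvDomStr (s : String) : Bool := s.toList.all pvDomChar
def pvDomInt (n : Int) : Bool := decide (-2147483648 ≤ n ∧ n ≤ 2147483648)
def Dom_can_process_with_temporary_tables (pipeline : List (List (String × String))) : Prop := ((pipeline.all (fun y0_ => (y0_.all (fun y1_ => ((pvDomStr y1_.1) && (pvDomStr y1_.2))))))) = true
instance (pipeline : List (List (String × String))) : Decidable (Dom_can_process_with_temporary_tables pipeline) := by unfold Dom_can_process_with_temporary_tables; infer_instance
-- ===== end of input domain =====

-- ===== PORT A =====
-- B replaces A's per-stage membership scan with early return by a two-phase counting algorithm: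
-- a histogram of stage names, then sum of the six supported names' counts compared with the
-- pipeline length (objective: alternative).
-- Pre_ excludes pipelines containing a stage with no keys, on which next(iter(stage.keys()))
-- raises StopIteration.
def pvSupported : PySem.Set String :=
  PySem.Set.ofList ["$match", "$unwind", "$sort", "$skip", "$limit", "$lookup"]

-- loop of A: for stage in pipeline: if first key not in supported: return False
def pvLoopA : List (List (String × String)) → Bool
  | [] => true
  | stage :: rest =>
      -- next(iter(stage.keys())): first key of the dict; empty stage (StopIteration) is outside Pre_
      let stage_name := (PySem.List.dedup (stage.map Prod.fst)).headD ""
      if pvSupported.contains stage_name then pvLoopA rest else false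

def can_process_with_temporary_tables (pipeline : List (List (String × String))) : Bool :=
  pvLoopA pipeline

-- ===== PORT B =====
-- supported, as the tuple Source B iterates over
def pvSupportedTuple : List String :=
  ["$match", "$unwind", "$sort", "$skip", "$limit", "$lookup"]

def can_process_with_temporary_tables_alt (pipeline : List (List (String × String))) : Bool :=
  -- counts[name] = counts.get(name, 0) + 1 loop
  let counts : PySem.Dict String Int :=
    pipeline.foldl
      (fun d stage =>
        let name := (PySem.List.dedup (stage.map Prod.fst)).headD ""
        d.insert name (d.getD name 0 + 1))
      PySem.Dict.empty
  -- total += counts.get(s, 0) loop over the supported tuple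
  let total : Int := pvSupportedTuple.foldl (fun acc s => acc + counts.getD s 0) 0
  total == (pipeline.length : Int)

-- ===== PRECONDITION & SPEC =====
-- Pre_ excludes pipelines containing an empty stage: there next(iter(stage.keys())) raises
-- StopIteration in B (and in A, unless an earlier unsupported stage already returned False).
def Pre_can_process_with_temporary_tables (pipeline : List (List (String × String))) : Prop :=
  ∀ stage ∈ pipeline, stage ≠ []
instance (pipeline : List (List (String × String))) : Decidable (Pre_can_process_with_temporary_tables pipeline) := by unfold Pre_can_process_with_temporary_tables; infer_instance
def pvWitness_can_process_with_temporary_tables : (List (List (String × String))) :=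
  [[("$match", "a")], [("$sort", "b")]]
def Spec_can_process_with_temporary_tables (pipeline : List (List (String × String))) (out : Bool) : Prop := out = can_process_with_temporary_tables_alt pipeline
instance (pipeline : List (List (String × String))) (out : Bool) : Decidable (Spec_can_process_with_temporary_tables pipeline out) := by unfold Spec_can_process_with_temporary_tables; infer_instance

-- ===== CLAIM (what is proved, stated in full; the proofs are below) =====
def Claim_equal_can_process_with_temporary_tables : Prop := ∀ (pipeline : List (List (String × String))), Dom_can_process_with_temporary_tables pipeline → Pre_can_process_with_temporary_tables pipeline → Spec_can_process_with_temporary_tables pipeline (can_process_with_temporary_tables pipeline)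

-- ===== LEMMAS AND PROOFS =====

-- first key of each stage
def pvName (stage : List (String × String)) : String :=
  (PySem.List.dedup (stage.map Prod.fst)).headD ""

-- A's loop is an `all` over the first keys.
theorem pvLoopA_eq_all (pipeline : List (List (String × String))) :
    pvLoopA pipeline
      = (pipeline.map pvName).all (fun n => pvSupported.contains n) := by
  induction pipeline with
  | nil => rfl
  | cons stage rest ih =>
      simp only [pvLoopA, List.map_cons, List.all_cons, pvName]
      cases h : pvSupported.contains ((PySem.List.dedup (stage.map Prod.fst)).headD "") <;>
        simp [ih]

-- the sum B computes, as a function of the name list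
def pvSum6 (l : List String) : Int :=
  pvSupportedTuple.foldl (fun acc s => acc + (PySem.Dict.counter l).getD s 0) 0

theorem pvFoldlAdd (S : List String) (g : String → Int) (a : Int) :
    S.foldl (fun acc s => acc + g s) a = a + (S.map g).sum := by
  induction S generalizing a with
  | nil => simp
  | cons s S ih => simp only [List.foldl_cons, List.map_cons, List.sum_cons, ih]; ring

theorem pvSumMapAdd (S : List String) (f g : String → Int) :
    (S.map (fun s => f s + g s)).sum = (S.map f).sum + (S.map g).sum := by
  induction S with
  | nil => simp
  | cons s S ih => simp only [List.map_cons, List.sum_cons, ih]; ring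

theorem pvIndSum (x : String) (S : List String) (h : S.Nodup) :
    (S.map (fun s => if x == s then (1 : Int) else 0)).sum = if x ∈ S then 1 else 0 := by
  induction S with
  | nil => simp
  | cons t S ih =>
      rcases List.nodup_cons.mp h with ⟨ht, hS⟩
      rw [List.map_cons, List.sum_cons, ih hS]
      by_cases hx : t = x
      · subst hx; simp [ht]
      · simp [Ne.symm hx]

theorem pvCountSum (l S : List String) (h : S.Nodup) :
    (S.map (fun s => ((l.count s : Int)))).sum
      = ((l.filter (fun n => decide (n ∈ S))).length : Int) := by
  induction l with
  | nil => simp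
  | cons x l ih =>
      have step : (S.map (fun s => (((x :: l).count s : Int)))).sum
          = (S.map (fun s => ((l.count s : Int)))).sum
            + (S.map (fun s => if x == s then (1 : Int) else 0)).sum := by
        rw [← pvSumMapAdd]
        simp only [List.count_cons, Nat.cast_add, Nat.cast_ite, Nat.cast_one, Nat.cast_zero]
      rw [step, ih, pvIndSum x S h, List.filter_cons]
      by_cases hx : x ∈ S <;> simp [hx]

theorem pvSum6_eq_filter (l : List String) :
    pvSum6 l = ((l.filter (fun n => pvSupported.contains n)).length : Int) := by
  have hnd : pvSupportedTuple.Nodup := by decide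
  have hp : ∀ n ∈ l, decide (n ∈ pvSupportedTuple) = pvSupported.contains n := by
    intro n _
    rw [Bool.eq_iff_iff]
    simp [pvSupported, pvSupportedTuple, PySem.Set.mem_ofList]
  rw [pvSum6, pvFoldlAdd, zero_add]
  have hcnt : (pvSupportedTuple.map (fun s => (PySem.Dict.counter l).getD s 0)).sum
      = (pvSupportedTuple.map (fun s => ((l.count s : Int)))).sum := by
    simp [PySem.Dict.getD_counter]
  rw [hcnt, pvCountSum l _ hnd, List.filter_congr hp]

theorem pvFilterLen (l : List String) (p : String → Bool) :
    ((l.filter p).length = l.length) ↔ l.all p = true := by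
  induction l with
  | nil => simp
  | cons x l ih =>
      have hle := List.length_filter_le p l
      cases h : p x <;> simp [h, ih, List.all_cons] <;> omega


-- B's counter loop builds PySem.Dict.counter of the name list.
theorem pvAlt_eq (pipeline : List (List (String × String))) :
    can_process_with_temporary_tables_alt pipeline
      = (pvSum6 (pipeline.map pvName) == ((pipeline.map pvName).length : Int)) := by
  simp only [can_process_with_temporary_tables_alt, pvSum6, List.length_map]
  have h : pipeline.foldl
      (fun d stage =>
        let name := (PySem.List.dedup (stage.map Prod.fst)).headD ""
        d.insert name (d.getD name 0 + 1))
      PySem.Dict.empty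
      = PySem.Dict.counter (pipeline.map pvName) := by
    rw [← PySem.Dict.foldl_insert_getD_add_one_eq_counter, List.foldl_map]
    rfl
  rw [h]

-- ===== VERDICT (by name: the statement is the Claim_ definition above) =====
theorem can_process_with_temporary_tables_spec : Claim_equal_can_process_with_temporary_tables := by
  intro pipeline _ _
  unfold Spec_can_process_with_temporary_tables can_process_with_temporary_tables
  rw [pvAlt_eq, pvLoopA_eq_all, pvSum6_eq_filter]
  rcases h : (pipeline.map pvName).all (fun n => pvSupported.contains n) with _ | _
  · have hne : ((pipeline.map pvName).filter (fun n => pvSupported.contains n)).length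
        ≠ (pipeline.map pvName).length := by
      rw [Ne, pvFilterLen, h]; simp
    have hb : ((((pipeline.map pvName).filter (fun n => pvSupported.contains n)).length : Int)
        == ((pipeline.map pvName).length : Int)) = false := by
      rw [beq_eq_false_iff_ne]
      exact fun hc => hne (by exact_mod_cast hc)
    rw [hb]
  · rw [(pvFilterLen _ _).mpr h]
    simp
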